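-- pv_equiv track=rewrite | github.com/MrHummerberg/NUT-Automation-Project | nut_automation/configs.py | actualizar_notifycmd_en_contenido
-- ===== SOURCE A (Python) =====
-- def actualizar_notifycmd_en_contenido(contenido_actual: str, nueva_linea: str) -> str:
--     """Actualiza o añade NOTIFYCMD en el texto de upsmon.conf."""
--     lineas = contenido_actual.splitlines()
--     nueva_linea = nueva_linea.strip()
--     indices_notify = [i for i, l in enumerate(lineas) if l.strip().startswith("NOTIFYCMD")]
--     if indices_notify:
--         primer = indices_notify[0]
--         nuevas_lineas = []
--         for i, l in enumerate(lineas):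
--             if i == primer:
--                 nuevas_lineas.append(nueva_linea)
--             elif i in indices_notify[1:]:
--                 continue
--             else:
--                 nuevas_lineas.append(l)
--         resultado = "\n".join(nuevas_lineas) + "\n"
--         return resultado
--     nuevas_lineas = list(lineas)
--     if nuevas_lineas and nuevas_lineas[-1].strip():
--         nuevas_lineas.append("")
--     nuevas_lineas.append(nueva_linea)
--     return "\n".join(nuevas_lineas) + "\n"
-- ===== SOURCE B (Python) =====
-- def actualizar_notifycmd_en_contenido(contenido_actual: str, nueva_linea: str) -> str:
--     """Single pass with a 'reemplazado' flag instead of precomputing match indices."""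
--     lineas = contenido_actual.splitlines()
--     nueva = nueva_linea.strip()
--     out = []
--     reemplazado = False
--     for l in lineas:
--         if l.strip().startswith("NOTIFYCMD"):
--             if not reemplazado:
--                 out.append(nueva)
--                 reemplazado = True
--         else:
--             out.append(l)
--     if reemplazado:
--         return "\n".join(out) + "\n"
--     if lineas and lineas[-1].strip():
--         lineas.append("")
--     lineas.append(nueva)
--     return "\n".join(lineas) + "\n"
-- ===== Notes on version B (the rewrite author's own statement) =====
-- stated objective: simpler
-- what changed: Replaced the precomputed indices_notify list and the i==primer / i in indices[1:] index tests with a single pass carrying a 'reemplazado' flag that replaces the first NOTIFYCMD line and skips later ones.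
import Mathlib
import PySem

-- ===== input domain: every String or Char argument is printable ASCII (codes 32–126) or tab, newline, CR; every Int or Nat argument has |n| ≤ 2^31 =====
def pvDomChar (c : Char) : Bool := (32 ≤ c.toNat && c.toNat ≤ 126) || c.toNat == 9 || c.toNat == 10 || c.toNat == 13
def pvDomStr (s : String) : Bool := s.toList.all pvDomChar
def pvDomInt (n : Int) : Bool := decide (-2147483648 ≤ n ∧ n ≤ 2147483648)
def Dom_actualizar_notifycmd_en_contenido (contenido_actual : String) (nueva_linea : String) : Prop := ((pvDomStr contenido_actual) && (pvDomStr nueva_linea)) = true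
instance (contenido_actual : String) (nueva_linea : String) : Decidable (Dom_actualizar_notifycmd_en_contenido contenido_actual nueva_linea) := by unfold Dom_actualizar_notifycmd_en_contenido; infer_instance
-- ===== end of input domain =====

-- B replaces A's precomputed indices_notify list (and its per-line membership test) by one pass
-- carrying a 'reemplazado' flag; objective: simpler.

-- the predicate l.strip().startswith("NOTIFYCMD"), literally shared by both Python sources
def pvNotify (l : String) : Bool := PySem.Str.startswith (PySem.Str.strip l) "NOTIFYCMD"

-- ===== PORT A =====
def actualizar_notifycmd_en_contenido (contenido_actual : String) (nueva_linea : String) : String :=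
  let lineas := PySem.Str.splitlines contenido_actual
  let nueva := PySem.Str.strip nueva_linea
  let indices_notify : List Int :=
    ((PySem.List.enumerate lineas).filter (fun p => pvNotify p.2)).map (·.1)
  match indices_notify with
  | primer :: rest =>
      let nuevas_lineas := (PySem.List.enumerate lineas).foldl
        (fun acc p =>
          if p.1 = primer then acc ++ [nueva]
          else if p.1 ∈ rest then acc
          else acc ++ [p.2]) []
      PySem.Str.join "\n" nuevas_lineas ++ "\n"
  | [] =>
      -- 'if nuevas_lineas and nuevas_lineas[-1].strip():' — [-1] guarded by nonemptiness, ported via getLastD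
      let nuevas_lineas :=
        if lineas ≠ [] ∧ PySem.Str.strip (lineas.getLastD "") ≠ "" then lineas ++ [""] else lineas
      PySem.Str.join "\n" (nuevas_lineas ++ [nueva]) ++ "\n"

-- ===== PORT B =====
def actualizar_notifycmd_en_contenido_alt (contenido_actual : String) (nueva_linea : String) : String :=
  let lineas := PySem.Str.splitlines contenido_actual
  let nueva := PySem.Str.strip nueva_linea
  let r := lineas.foldl
    (fun (s : List String × Bool) l =>
      if pvNotify l then (if s.2 then s else (s.1 ++ [nueva], true))
      else (s.1 ++ [l], s.2)) ([], false)
  if r.2 then PySem.Str.join "\n" r.1 ++ "\n"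
  else
    let nl := if lineas ≠ [] ∧ PySem.Str.strip (lineas.getLastD "") ≠ "" then lineas ++ [""] else lineas
    PySem.Str.join "\n" (nl ++ [nueva]) ++ "\n"

-- ===== PRECONDITION & SPEC =====
def Spec_actualizar_notifycmd_en_contenido (contenido_actual : String) (nueva_linea : String) (out : String) : Prop := out = actualizar_notifycmd_en_contenido_alt contenido_actual nueva_linea
instance (contenido_actual : String) (nueva_linea : String) (out : String) : Decidable (Spec_actualizar_notifycmd_en_contenido contenido_actual nueva_linea out) := by unfold Spec_actualizar_notifycmd_en_contenido; infer_instance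

-- ===== CLAIM (what is proved, stated in full; the proofs are below) =====
def Claim_equal_actualizar_notifycmd_en_contenido : Prop := ∀ (contenido_actual : String) (nueva_linea : String), Dom_actualizar_notifycmd_en_contenido contenido_actual nueva_linea → Spec_actualizar_notifycmd_en_contenido contenido_actual nueva_linea (actualizar_notifycmd_en_contenido contenido_actual nueva_linea)

-- ===== LEMMAS AND PROOFS =====

-- the common result shape: replace the first NOTIFYCMD line, drop the rest
def pvRF (nueva : String) : List String → List String
  | [] => []
  | l :: ls => if pvNotify l then nueva :: ls.filter (fun x => !pvNotify x) else l :: pvRF nueva ls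

theorem pvSkipAll (nueva : String) (primer : Int) (rest : List Int) :
    ∀ (xs : List String) (k : Int) (acc : List String),
    primer < k →
    (∀ i x, (i, x) ∈ PySem.List.enumerate xs k → (i ∈ rest ↔ pvNotify x = true)) →
    (PySem.List.enumerate xs k).foldl
      (fun acc p =>
        if p.1 = primer then acc ++ [nueva]
        else if p.1 ∈ rest then acc
        else acc ++ [p.2]) acc
      = acc ++ xs.filter (fun x => !pvNotify x) := by
  intro xs
  induction xs with
  | nil => intro k acc _ _; simp [PySem.List.enumerate_nil]
  | cons x xs ih =>
    intro k acc hk hmem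
    rw [PySem.List.enumerate_cons, List.foldl_cons]
    have hx := hmem k x (by rw [PySem.List.enumerate_cons]; exact List.mem_cons_self)
    have hkp : ¬ (k = primer) := by omega
    by_cases hpx : pvNotify x = true
    · have : k ∈ rest := hx.mpr hpx
      simp only [hkp, if_false, this, if_true]
      rw [ih (k+1) acc (by omega)
        (fun i y hy => hmem i y (by rw [PySem.List.enumerate_cons]; exact List.mem_cons_of_mem _ hy))]
      simp [List.filter_cons, hpx]
    · have : ¬ k ∈ rest := fun h => hpx (hx.mp h)
      simp only [hkp, if_false, this, if_true]
      rw [ih (k+1) (acc ++ [x]) (by omega)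
        (fun i y hy => hmem i y (by rw [PySem.List.enumerate_cons]; exact List.mem_cons_of_mem _ hy))]
      simp [List.filter_cons, hpx]

theorem pvFoldA (nueva : String) (primer : Int) (rest : List Int) :
    ∀ (xs : List String) (k : Int) (acc : List String),
    k ≤ primer →
    (∀ i ∈ rest, primer < i) →
    (∀ i x, (i, x) ∈ PySem.List.enumerate xs k → ((i = primer ∨ i ∈ rest) ↔ pvNotify x = true)) →
    (PySem.List.enumerate xs k).foldl
      (fun acc p =>
        if p.1 = primer then acc ++ [nueva]
        else if p.1 ∈ rest then acc
        else acc ++ [p.2]) acc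
      = acc ++ pvRF nueva xs := by
  intro xs
  induction xs with
  | nil => intro k acc _ _ _; simp [PySem.List.enumerate_nil, pvRF]
  | cons x xs ih =>
    intro k acc hk hrest hmem
    rw [PySem.List.enumerate_cons, List.foldl_cons]
    have hx := hmem k x (by rw [PySem.List.enumerate_cons]; exact List.mem_cons_self)
    by_cases hpx : pvNotify x = true
    · have hk' : k = primer ∨ k ∈ rest := hx.mpr hpx
      have hkp : k = primer := by
        rcases hk' with h | h
        · exact h
        · exact absurd (hrest k h) (by omega)
      subst hkp
      simp only [eq_self_iff_true, if_true]
      rw [pvSkipAll nueva k rest xs (k+1) (acc ++ [nueva]) (by omega)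
        (fun i y hy => by
          have h1 := hmem i y (by rw [PySem.List.enumerate_cons]; exact List.mem_cons_of_mem _ hy)
          have h2 : k < i := by
            rcases (PySem.List.mem_enumerate_iff _ _ _).mp hy with ⟨j, hj, hmemj⟩
            have : i = k + 1 + j := by exact congrArg Prod.fst hmemj
            omega
          constructor
          · intro h; exact h1.mp (Or.inr h)
          · intro h
            rcases h1.mpr h with h | h
            · omega
            · exact h)]
      simp [pvRF, hpx]
    · have hknp : ¬ (k = primer) := by
        intro h; exact hpx (hx.mp (Or.inl h))
      have hknr : ¬ k ∈ rest := by
        intro h; exact hpx (hx.mp (Or.inr h))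
      simp only [hknp, if_false, hknr, if_true]
      rw [ih (k+1) (acc ++ [x]) (by omega) hrest
        (fun i y hy => hmem i y (by rw [PySem.List.enumerate_cons]; exact List.mem_cons_of_mem _ hy))]
      simp [pvRF, hpx]

theorem pvFoldB_true (nueva : String) :
    ∀ (xs : List String) (acc : List String),
    xs.foldl
      (fun (s : List String × Bool) l =>
        if pvNotify l then (if s.2 then s else (s.1 ++ [nueva], true))
        else (s.1 ++ [l], s.2)) (acc, true)
      = (acc ++ xs.filter (fun x => !pvNotify x), true) := by
  intro xs
  induction xs with
  | nil => intro acc; simp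
  | cons x xs ih =>
    intro acc
    by_cases hpx : pvNotify x = true <;> simp [hpx, List.filter_cons, ih]

theorem pvFoldB (nueva : String) :
    ∀ (xs : List String) (acc : List String),
    xs.foldl
      (fun (s : List String × Bool) l =>
        if pvNotify l then (if s.2 then s else (s.1 ++ [nueva], true))
        else (s.1 ++ [l], s.2)) (acc, false)
      = if xs.any pvNotify then (acc ++ pvRF nueva xs, true) else (acc ++ xs, false) := by
  intro xs
  induction xs with
  | nil => intro acc; simp [pvRF]
  | cons x xs ih =>
    intro acc
    by_cases hpx : pvNotify x = true
    · simp [hpx, pvRF, pvFoldB_true]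
    · simp only [List.foldl_cons, hpx, if_false, Bool.false_eq_true, List.any_cons, Bool.false_or]
      rw [ih (acc ++ [x])]
      by_cases h : xs.any pvNotify <;> simp [h, pvRF, hpx]

-- in 'enumerate xs 0' the first component determines the second
theorem pvEnumInj {α : Type} (xs : List α) (k : Int) (i : Int) (x y : α)
    (hx : (i, x) ∈ PySem.List.enumerate xs k) (hy : (i, y) ∈ PySem.List.enumerate xs k) : x = y := by
  rcases (PySem.List.mem_enumerate_iff _ _ _).mp hx with ⟨a, ha, hpa⟩
  rcases (PySem.List.mem_enumerate_iff _ _ _).mp hy with ⟨b, hb, hpb⟩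
  have h1 : i = k + a ∧ x = xs[a] := Prod.mk.injEq .. ▸ hpa
  have h2 : i = k + b ∧ y = xs[b] := Prod.mk.injEq .. ▸ hpb
  have hab : a = b := by omega
  subst hab
  rw [h1.2, h2.2]

theorem pvIndicesMem (xs : List String) (i : Int) (x : String)
    (hx : (i, x) ∈ PySem.List.enumerate xs 0) :
    (i ∈ ((PySem.List.enumerate xs 0).filter (fun p => pvNotify p.2)).map (·.1)
      ↔ pvNotify x = true) := by
  constructor
  · intro h
    rcases List.mem_map.mp h with ⟨⟨i', y⟩, hmem, hfst⟩
    rcases List.mem_filter.mp hmem with ⟨hy, hpy⟩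
    simp only at hfst
    have : y = x := pvEnumInj xs 0 i y x (hfst ▸ hy) hx
    rw [← this]
    exact hpy
  · intro h
    exact List.mem_map.mpr ⟨(i, x), List.mem_filter.mpr ⟨hx, h⟩, rfl⟩

theorem pvIndicesSorted (xs : List String) (k : Int) :
    (((PySem.List.enumerate xs k).filter (fun p => pvNotify p.2)).map (·.1)).Pairwise (· < ·) := by
  exact List.Pairwise.map _ (fun _ _ h => h)
    (List.Pairwise.filter _ (PySem.List.pairwise_lt_enumerate xs k))

theorem pvIndicesNonneg (xs : List String) (i : Int)
    (h : i ∈ ((PySem.List.enumerate xs 0).filter (fun p => pvNotify p.2)).map (·.1)) : 0 ≤ i := by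
  rcases List.mem_map.mp h with ⟨p, hmem, hfst⟩
  rcases (PySem.List.mem_enumerate_iff _ _ _).mp (List.mem_filter.mp hmem).1 with ⟨a, ha, hpa⟩
  subst hpa
  simp only at hfst
  omega

theorem pvIndicesEmpty (xs : List String)
    (h : ((PySem.List.enumerate xs 0).filter (fun p => pvNotify p.2)).map (·.1) = []) :
    xs.any pvNotify = false := by
  by_contra hc
  rcases List.any_eq_true.mp (Bool.of_not_eq_false hc) with ⟨x, hx, hpx⟩
  rcases List.mem_iff_getElem.mp hx with ⟨a, ha, hxa⟩
  have hmem : ((0 : Int) + a, x) ∈ PySem.List.enumerate xs 0 :=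
    (PySem.List.mem_enumerate_iff _ _ _).mpr ⟨a, ha, by rw [hxa]⟩
  have := pvIndicesMem xs (0 + a) x hmem |>.mpr hpx
  rw [h] at this
  exact List.not_mem_nil this

theorem pvIndicesNonempty (xs : List String) (h : xs.any pvNotify = true) :
    ((PySem.List.enumerate xs 0).filter (fun p => pvNotify p.2)).map (·.1) ≠ [] := by
  intro hc
  rw [pvIndicesEmpty xs hc] at h
  exact Bool.false_ne_true h

-- ===== VERDICT (by name: the statement is the Claim_ definition above) =====
theorem actualizar_notifycmd_en_contenido_spec : Claim_equal_actualizar_notifycmd_en_contenido := by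
  intro contenido_actual nueva_linea _
  unfold Spec_actualizar_notifycmd_en_contenido
  unfold actualizar_notifycmd_en_contenido actualizar_notifycmd_en_contenido_alt
  set lineas := PySem.Str.splitlines contenido_actual with hlin
  set nueva := PySem.Str.strip nueva_linea with hnue
  simp only
  by_cases hany : lineas.any pvNotify = true
  · -- some NOTIFYCMD line exists: both sides produce pvRF
    rcases List.exists_cons_of_ne_nil (pvIndicesNonempty lineas hany) with ⟨primer, rest, hind⟩
    rw [hind]
    rw [pvFoldB nueva lineas [], if_pos hany]
    simp only [if_true, List.nil_append]
    have hsorted := pvIndicesSorted lineas 0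
    rw [hind] at hsorted
    have hrest : ∀ i ∈ rest, primer < i := (List.pairwise_cons.mp hsorted).1
    have hp0 : 0 ≤ primer := pvIndicesNonneg lineas primer (by rw [hind]; exact List.mem_cons_self)
    rw [pvFoldA nueva primer rest lineas 0 [] hp0 hrest
      (fun i x hx => by
        have := pvIndicesMem lineas i x hx
        rw [hind] at this
        simpa using this)]
    simp
  · -- no NOTIFYCMD line: A's indices list is empty, B's flag stays false; identical tails
    have hfalse : lineas.any pvNotify = false := by simpa using hany
    have hthis : ((PySem.List.enumerate lineas 0).filter (fun p => pvNotify p.2)).map (·.1) = [] := by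
      by_contra hc
      rcases List.exists_cons_of_ne_nil hc with ⟨primer, rest, hi⟩
      have hm : primer ∈ ((PySem.List.enumerate lineas 0).filter (fun p => pvNotify p.2)).map (·.1) := by
        rw [hi]; exact List.mem_cons_self
      rcases List.mem_map.mp hm with ⟨p, hmem, hfst⟩
      rcases List.mem_filter.mp hmem with ⟨hp1, hp2⟩
      have hx : p.2 ∈ lineas := by
        have h2 := PySem.List.map_snd_enumerate lineas (0 : Int)
        exact h2 ▸ List.mem_map_of_mem hp1
      exact hany (List.any_eq_true.mpr ⟨p.2, hx, hp2⟩)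
    rw [hthis, pvFoldB nueva lineas [], hfalse]
    simp
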